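-- pv_equiv track=rewrite | github.com/byhhh2/Coding-Test-Preparations | Python-BAEKJOON/1003.py | zeroCounter
-- ===== SOURCE A (Python) =====
-- zero_arr = []
--
-- def zeroCounter(N):
--     try:
--         return zero_arr[N]
--     except IndexError:
--         if N == 0:
--             return 1
--         elif N == 1:
--             return 0
--         else:
--             return zeroCounter(N-1) + zeroCounter(N-2)
-- ===== SOURCE B (Python) =====
-- def zeroCounter(N):
--     a, b = 1, 0
--     for _ in range(N):
--         a, b = b, a + b
--     return a
-- ===== Notes on version B (the rewrite author's own statement) =====
-- stated objective: faster
-- what changed: replaces the exponential two-branch recursion (with a dead memo-array lookup) by an iterative two-variable Fibonacci loop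
import Mathlib
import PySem

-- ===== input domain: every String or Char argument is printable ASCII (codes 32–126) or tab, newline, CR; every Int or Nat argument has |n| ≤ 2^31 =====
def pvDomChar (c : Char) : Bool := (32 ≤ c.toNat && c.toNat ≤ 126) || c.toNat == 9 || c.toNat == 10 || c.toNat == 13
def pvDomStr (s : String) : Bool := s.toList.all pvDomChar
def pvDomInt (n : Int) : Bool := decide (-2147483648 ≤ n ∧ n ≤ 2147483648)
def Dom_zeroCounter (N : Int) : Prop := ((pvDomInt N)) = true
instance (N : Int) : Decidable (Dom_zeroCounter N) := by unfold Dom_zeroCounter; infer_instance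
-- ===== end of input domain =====

-- B replaces A's exponential two-branch recursion by an iterative two-variable loop (asymptotically faster).
-- A's memo lookup 'zero_arr[N]' always raises IndexError (the array stays empty), so it is a no-op and is not ported.

-- ===== PORT A =====
-- A's recursion, guarded so it is total on Int: for N < 0 the Python recurses forever
-- (RecursionError), which Pre_ excludes; the value returned there is irrelevant junk.
def zeroCounter (N : Int) : Int :=
  if N = 0 then 1
  else if N = 1 then 0
  else if 2 ≤ N then zeroCounter (N - 1) + zeroCounter (N - 2)
  else 0
termination_by N.toNat
decreasing_by all_goals omega

-- ===== PORT B =====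
def zeroCounter_alt (N : Int) : Int :=
  ((PySem.List.pyRange 0 N 1).foldl (fun (p : Int × Int) _ => (p.2, p.1 + p.2)) (1, 0)).1

-- ===== PRECONDITION & SPEC =====
-- Pre_ excludes N < 0, on which A recurses with no base case and raises (RecursionError).
def Pre_zeroCounter (N : Int) : Prop := 0 ≤ N
instance (N : Int) : Decidable (Pre_zeroCounter N) := by unfold Pre_zeroCounter; infer_instance
def pvWitness_zeroCounter : Int := (7)

def Spec_zeroCounter (N : Int) (out : Int) : Prop := out = zeroCounter_alt N
instance (N : Int) (out : Int) : Decidable (Spec_zeroCounter N out) := by unfold Spec_zeroCounter; infer_instance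

-- ===== CLAIM (what is proved, stated in full; the proofs are below) =====
def Claim_equal_zeroCounter : Prop := ∀ (N : Int), Dom_zeroCounter N → Pre_zeroCounter N → Spec_zeroCounter N (zeroCounter N)
-- ===== LEMMAS AND PROOFS =====

-- the loop step of B
def pvStep (p : Int × Int) : Int × Int := (p.2, p.1 + p.2)

lemma foldl_const_step (l : List Int) (p : Int × Int) :
    l.foldl (fun (p : Int × Int) _ => (p.2, p.1 + p.2)) p = pvStep^[l.length] p := by
  induction l generalizing p with
  | nil => rfl
  | cons a t ih => simp [List.foldl, ih, pvStep, Function.iterate_succ_apply]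

-- loop invariant: after n iterations the pair is (A n, A (n+1))
lemma iterate_step (n : Nat) :
    pvStep^[n] (1, 0) = (zeroCounter (n : Int), zeroCounter ((n : Int) + 1)) := by
  induction n with
  | zero => simp [zeroCounter]
  | succ k ih =>
      rw [Function.iterate_succ_apply', ih, pvStep]
      dsimp only
      simp only [Prod.mk.injEq]
      constructor
      · push_cast; ring_nf
      · rw [show ((↑(k + 1) : Int) + 1) = ((k : Int) + 2) by push_cast; ring]
        conv_rhs => rw [zeroCounter]
        have h0 : ¬ ((k : Int) + 2 = 0) := by omega
        have h1 : ¬ ((k : Int) + 2 = 1) := by omega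
        have h2 : (2 : Int) ≤ (k : Int) + 2 := by omega
        rw [if_neg h0, if_neg h1, if_pos h2,
            show ((k : Int) + 2 - 1) = (k : Int) + 1 by ring,
            show ((k : Int) + 2 - 2) = (k : Int) by ring]
        ring

-- ===== VERDICT (by name: the statement is the Claim_ definition above) =====
theorem zeroCounter_spec : Claim_equal_zeroCounter := by
  intro N _ hpre
  unfold Spec_zeroCounter zeroCounter_alt
  rw [foldl_const_step, PySem.List.length_pyRange_one]
  obtain ⟨n, rfl⟩ := Int.eq_ofNat_of_zero_le hpre
  rw [show ((n : Int) - 0).toNat = n by omega, iterate_step]
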